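-- pv_equiv track=rewrite | github.com/akissinger/dodo | dodo/util.py | separate_headers
-- ===== SOURCE A (Python) =====
-- from typing import Iterator, List, Tuple, Dict, Union
--
-- def separate_headers(s: str) -> Tuple[str, str]:
--     """Split a message into its header part and body part"""
--
--     h = ''
--     b = ''
--     headers = True
--     for line in s.splitlines():
--         if headers and line == '':
--             headers = False
--         elif headers:
--             h += line + '\n'
--         else:
--             b += line + '\n'
--     return (h, b)
-- ===== SOURCE B (Python) =====
-- def separate_headers(s):
--     """Split a message into its header part and body part"""
--     lines = s.splitlines()
--     try:
--         i = lines.index('')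
--     except ValueError:
--         i = len(lines)
--     h = ''.join(line + '\n' for line in lines[:i])
--     b = ''.join(line + '\n' for line in lines[i + 1:])
--     return (h, b)
-- ===== Notes on version B (the rewrite author's own statement) =====
-- stated objective: simpler
-- what changed: Replaces the stateful per-line boolean-flag loop with a find-the-first-blank-line boundary followed by two slice-and-join passes.
import Mathlib
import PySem

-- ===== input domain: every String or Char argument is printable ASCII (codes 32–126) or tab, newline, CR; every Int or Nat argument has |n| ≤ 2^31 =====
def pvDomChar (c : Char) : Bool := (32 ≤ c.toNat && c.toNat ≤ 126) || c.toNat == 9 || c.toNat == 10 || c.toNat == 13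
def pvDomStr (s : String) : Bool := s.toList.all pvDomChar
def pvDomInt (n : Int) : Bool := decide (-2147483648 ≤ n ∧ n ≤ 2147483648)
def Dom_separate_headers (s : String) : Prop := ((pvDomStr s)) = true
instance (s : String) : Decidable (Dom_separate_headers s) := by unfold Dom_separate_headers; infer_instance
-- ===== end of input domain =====

-- B replaces A's stateful boolean-flag loop by: find the first blank line, then join the two slices (simpler decomposition; same cost).

-- ===== PORT A =====
-- A: one fold over splitlines carrying (h, b, headers-flag), branches in A's order.
def separate_headers (s : String) : String × String :=
  let r := (PySem.Chars.splitlines s.toList).foldl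
    (fun (st : List Char × List Char × Bool) line =>
      if st.2.2 && line == [] then (st.1, st.2.1, false)
      else if st.2.2 then (st.1 ++ line ++ ['\n'], st.2.1, true)
      else (st.1, st.2.1 ++ line ++ ['\n'], false))
    ([], [], true)
  (String.ofList r.1, String.ofList r.2.1)

-- ===== PORT B =====
-- B: index of the first empty line (length if none), then ''.join(line+'\n') over the two slices.
def separate_headers_alt (s : String) : String × String :=
  let lines := PySem.Chars.splitlines s.toList
  let i := lines.findIdx (· == [])
  (String.ofList (PySem.Chars.join [] ((lines.take i).map (· ++ ['\n']))),
   String.ofList (PySem.Chars.join [] ((lines.drop (i + 1)).map (· ++ ['\n']))))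

-- ===== PRECONDITION & SPEC =====
def Spec_separate_headers (s : String) (out : String × String) : Prop := out = separate_headers_alt s
instance (s : String) (out : String × String) : Decidable (Spec_separate_headers s out) := by unfold Spec_separate_headers; infer_instance

-- ===== CLAIM (what is proved, stated in full; the proofs are below) =====
def Claim_equal_separate_headers : Prop := ∀ (s : String), Dom_separate_headers s → Spec_separate_headers s (separate_headers s)

-- ===== LEMMAS AND PROOFS =====

-- A's step function, named for the proofs.
def shStep (st : List Char × List Char × Bool) (line : List Char) : List Char × List Char × Bool :=
  if st.2.2 && line == [] then (st.1, st.2.1, false)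
  else if st.2.2 then (st.1 ++ line ++ ['\n'], st.2.1, true)
  else (st.1, st.2.1 ++ line ++ ['\n'], false)

-- ''.join with empty separator is flatten.
lemma join_empty_eq_flatten (xs : List (List Char)) :
    PySem.Chars.join [] xs = xs.flatten := by
  induction xs with
  | nil => simp [PySem.Chars.join, List.intercalate]
  | cons x xs ih =>
    cases xs with
    | nil => simp [PySem.Chars.join, List.intercalate]
    | cons y ys => rw [PySem.Chars.join_cons_cons, ih]; simp

lemma shStep_false (h b l : List Char) :
    shStep (h, b, false) l = (h, b ++ l ++ ['\n'], false) := by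
  simp [shStep]

lemma shStep_true_nil (h b : List Char) :
    shStep (h, b, true) [] = (h, b, false) := by
  simp [shStep]

lemma shStep_true (h b l : List Char) (hl : l ≠ []) :
    shStep (h, b, true) l = (h ++ l ++ ['\n'], b, true) := by
  simp [shStep, hl]

-- Once the flag is false, every remaining line goes to the body.
lemma shFold_false (lines : List (List Char)) (h b : List Char) :
    lines.foldl shStep (h, b, false)
      = (h, b ++ (lines.map (· ++ ['\n'])).flatten, false) := by
  induction lines generalizing b with
  | nil => simp
  | cons l ls ih =>
      rw [List.foldl_cons, shStep_false, ih]
      simp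

-- While the flag is true, the fold computes B's two slices around the first empty line.
lemma shFold_true (lines : List (List Char)) (h b : List Char) :
    (lines.foldl shStep (h, b, true)).1
        = h ++ ((lines.take (lines.findIdx (· == []))).map (· ++ ['\n'])).flatten
    ∧ (lines.foldl shStep (h, b, true)).2.1
        = b ++ ((lines.drop (lines.findIdx (· == []) + 1)).map (· ++ ['\n'])).flatten := by
  induction lines generalizing h b with
  | nil => simp
  | cons l ls ih =>
      by_cases hl : l = []
      · subst hl
        rw [List.foldl_cons, shStep_true_nil, shFold_false]
        have h0 : List.findIdx (· == []) (([] : List Char) :: ls) = 0 := by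
          rw [List.findIdx_cons]; simp
        rw [h0]
        simp
      · have hbeq : (l == ([] : List Char)) = false := by simpa using hl
        rw [List.foldl_cons, shStep_true h b l hl]
        obtain ⟨ih1, ih2⟩ := ih (h ++ l ++ ['\n']) b
        rw [List.findIdx_cons, hbeq]
        constructor
        · rw [ih1]; simp
        · rw [ih2]; simp

-- ===== VERDICT (by name: the statement is the Claim_ definition above) =====
theorem separate_headers_spec : Claim_equal_separate_headers := by
  intro s _
  unfold Spec_separate_headers separate_headers separate_headers_alt
  obtain ⟨h1, h2⟩ := shFold_true (PySem.Chars.splitlines s.toList) [] []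
  simp only [show (fun (st : List Char × List Char × Bool) line =>
      if st.2.2 && line == [] then (st.1, st.2.1, false)
      else if st.2.2 then (st.1 ++ line ++ ['\n'], st.2.1, true)
      else (st.1, st.2.1 ++ line ++ ['\n'], false)) = shStep from rfl]
  rw [h1, h2, join_empty_eq_flatten, join_empty_eq_flatten]
  simp
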